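-- pv_equiv track=rewrite | github.com/Noa-Izsak/Learning-Broadcast-Protocols-with-LeoParDS | main.py | filter_strings
-- ===== SOURCE A (Python) =====
-- def filter_strings(dictionary):
--     filtered_dict = {}
--
--     for key in sorted(dictionary.keys()):
--         current_value = dictionary[key]
--         filtered_value = [string for string in current_value if all(
--             string not in lower_value for lower_key, lower_value in filtered_dict.items() if lower_key < key)]
--
--         if filtered_value:
--             filtered_dict[key] = filtered_value
--
--     return filtered_dict
-- ===== SOURCE B (Python) =====
-- def filter_strings(dictionary):
--     keys = sorted(dictionary.keys())
--     # pass 1: smallest key whose list contains each string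
--     min_key = {}
--     for key in keys:
--         for s in dictionary[key]:
--             if s not in min_key:
--                 min_key[s] = key
--     # pass 2: keep a string only under its smallest key
--     result = {}
--     for key in keys:
--         filtered_value = [s for s in dictionary[key] if min_key[s] == key]
--         if filtered_value:
--             result[key] = filtered_value
--     return result
-- ===== Notes on version B (the rewrite author's own statement) =====
-- stated objective: faster
-- what changed: Replaces A's accumulate-and-test pass (each string rescanned against every previously kept list) by two passes: first a hash table mapping each string to the smallest key whose list contains it, then a filter keeping a string only under that key.
import Mathlib
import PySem

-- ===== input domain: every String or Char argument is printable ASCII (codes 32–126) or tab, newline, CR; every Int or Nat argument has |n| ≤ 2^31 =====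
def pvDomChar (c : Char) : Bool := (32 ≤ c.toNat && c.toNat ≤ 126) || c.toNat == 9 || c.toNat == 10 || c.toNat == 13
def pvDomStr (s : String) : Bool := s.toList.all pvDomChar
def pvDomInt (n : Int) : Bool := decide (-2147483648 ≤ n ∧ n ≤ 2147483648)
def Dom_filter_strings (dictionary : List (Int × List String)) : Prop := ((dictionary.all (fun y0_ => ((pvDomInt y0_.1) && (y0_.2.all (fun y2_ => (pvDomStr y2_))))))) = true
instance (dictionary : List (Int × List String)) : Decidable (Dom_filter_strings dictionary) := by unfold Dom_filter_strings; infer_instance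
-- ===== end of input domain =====

-- B replaces A's per-string rescan of all previously kept lists by a precomputed
-- string → smallest-containing-key table followed by a single filtering pass (faster).

-- ===== PORT A =====
-- one loop iteration of A (dictionary[key] never raises: key comes from d.keys, so getD is exact)
def aStep (d : PySem.Dict Int (List String)) (fd : PySem.Dict Int (List String)) (key : Int) :
    PySem.Dict Int (List String) :=
  let current := d.getD key []
  let filtered := current.filter (fun s =>
    ((fd.items.filter (fun p => decide (p.1 < key))).all (fun p => !(p.2.contains s))))
  if filtered.isEmpty then fd else fd.insert key filtered

def filter_strings (dictionary : List (Int × List String)) : List (Int × List String) :=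
  let d := PySem.Dict.ofList dictionary
  ((PySem.List.sorted d.keys (fun k => k) false).foldl (aStep d) PySem.Dict.empty).items

-- ===== PORT B =====
-- pass 1 body: record the current key for every not-yet-seen string of dictionary[key]
def minKeyStep (d : PySem.Dict Int (List String)) (mk : PySem.Dict String Int) (key : Int) :
    PySem.Dict String Int :=
  (d.getD key []).foldl (fun mk s => if mk.contains s then mk else mk.insert s key) mk

-- pass 2 body: keep a string only under its recorded smallest key
def bStep (d : PySem.Dict Int (List String)) (mk : PySem.Dict String Int)
    (res : PySem.Dict Int (List String)) (key : Int) : PySem.Dict Int (List String) :=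
  let fv := (d.getD key []).filter (fun s => mk.getD s 0 == key)
  if fv.isEmpty then res else res.insert key fv

def filter_strings_alt (dictionary : List (Int × List String)) : List (Int × List String) :=
  let d := PySem.Dict.ofList dictionary
  let keys := PySem.List.sorted d.keys (fun k => k) false
  let mk := keys.foldl (minKeyStep d) PySem.Dict.empty
  (keys.foldl (bStep d mk) PySem.Dict.empty).items

-- ===== PRECONDITION & SPEC =====
def Spec_filter_strings (dictionary : List (Int × List String)) (out : List (Int × List String)) : Prop := out = filter_strings_alt dictionary
instance (dictionary : List (Int × List String)) (out : List (Int × List String)) : Decidable (Spec_filter_strings dictionary out) := by unfold Spec_filter_strings; infer_instance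

-- ===== CLAIM (what is proved, stated in full; the proofs are below) =====
def Claim_equal_filter_strings : Prop := ∀ (dictionary : List (Int × List String)), Dom_filter_strings dictionary → Spec_filter_strings dictionary (filter_strings dictionary)

-- ===== LEMMAS AND PROOFS =====

-- the per-key entry both folds produce (none when the filtered list is empty)
def gB (d : PySem.Dict Int (List String)) (mk : PySem.Dict String Int) (k : Int) :
    Option (Int × List String) :=
  let fv := (d.getD k []).filter (fun s => mk.getD s 0 == k)
  if fv.isEmpty then none else some (k, fv)

-- pass-1 inner loop: first writer wins
theorem inner_get? (k : Int) (t : String) (l : List String) (m : PySem.Dict String Int) :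
    (l.foldl (fun m s => if m.contains s then m else m.insert s k) m).get? t
      = (m.get? t).or (if l.contains t then some k else none) := by
  induction l generalizing m with
  | nil => simp
  | cons s l ih =>
    rw [List.foldl_cons, ih]
    by_cases hc : m.contains s = true
    · rw [if_pos hc]
      rcases h : m.get? t with _ | v
      · have hts : t ≠ s := by
          intro hts
          rw [PySem.Dict.contains_eq_isSome_get?, ← hts, h] at hc
          simp at hc
        simp [hts]
      · simp
    · rw [if_neg hc]
      have hm : m.get? s = none := by
        rw [PySem.Dict.contains_eq_isSome_get?] at hc
        exact Option.not_isSome_iff_eq_none.mp (by simp [hc])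
      rw [PySem.Dict.get?_insert]
      by_cases hts : t = s
      · subst hts
        simp [hm]
      · simp [hts]

-- pass-1 result: get? is the first key (in fold order) whose list contains the string
theorem mk_get? (d : PySem.Dict Int (List String)) (t : String) :
    ∀ (ks : List Int) (m : PySem.Dict String Int),
    (ks.foldl (minKeyStep d) m).get? t
      = (m.get? t).or (ks.find? (fun k => (d.getD k []).contains t))
  | [], m => by simp
  | k :: ks, m => by
    rw [List.foldl_cons]
    show ((ks.foldl (minKeyStep d) (minKeyStep d m k)).get? t) = _
    rw [mk_get? d t ks, minKeyStep, inner_get? k t]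
    by_cases h : (d.getD k []).contains t = true
    · rw [if_pos h, show List.find? (fun k0 => (d.getD k0 []).contains t) (k :: ks) = some k
        from List.find?_cons_of_pos h, Option.or_assoc]
      simp
    · rw [if_neg h, show List.find? (fun k0 => (d.getD k0 []).contains t) (k :: ks)
        = List.find? (fun k0 => (d.getD k0 []).contains t) ks
        from List.find?_cons_of_neg (by simpa using h)]
      simp

-- pass-2 fold appends one entry per key with a non-empty filtered list
theorem b_items (d : PySem.Dict Int (List String)) (mk : PySem.Dict String Int) :
    ∀ (ks : List Int) (res : PySem.Dict Int (List String)),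
    ks.Nodup → (∀ k ∈ ks, res.contains k = false) →
    (ks.foldl (bStep d mk) res).items = res.items ++ ks.filterMap (gB d mk)
  | [], res, _, _ => by simp
  | k :: ks, res, hnd, hfresh => by
    rw [List.foldl_cons, List.filterMap_cons]
    show (ks.foldl (bStep d mk) (bStep d mk res k)).items = _
    rw [bStep]
    by_cases he : ((d.getD k []).filter (fun s => mk.getD s 0 == k)).isEmpty = true
    · rw [if_pos he]
      have : gB d mk k = none := by rw [gB]; exact if_pos he
      rw [this, b_items d mk ks res hnd.of_cons (fun k' hk' => hfresh k' (List.mem_cons_of_mem _ hk'))]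
    · rw [if_neg he]
      have hfr : res.contains k = false := hfresh k List.mem_cons_self
      have hkks : k ∉ ks := (List.nodup_cons.mp hnd).1
      have hfresh' : ∀ k' ∈ ks, (res.insert k ((d.getD k []).filter (fun s => mk.getD s 0 == k))).contains k' = false := by
        intro k' hk'
        rw [PySem.Dict.contains_insert]
        have hne : (k' == k) = false := beq_eq_false_iff_ne.mpr (fun h => hkks (h ▸ hk'))
        simp [hne, hfresh k' (List.mem_cons_of_mem _ hk')]
      rw [b_items d mk ks _ hnd.of_cons hfresh',
        PySem.Dict.items_insert_of_not_contains res _ hfr]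
      have : gB d mk k = some (k, (d.getD k []).filter (fun s => mk.getD s 0 == k)) := by
        rw [gB]; exact if_neg he
      rw [this, List.append_assoc, List.singleton_append]

-- A's fold, with the already-processed keys `pre` abstracted, produces the same entries
theorem a_items (d : PySem.Dict Int (List String)) (mk : PySem.Dict String Int) :
    ∀ (ks : List Int) (fd : PySem.Dict Int (List String)) (pre : List Int),
    (pre ++ ks).Pairwise (· < ·) →
    (∀ t, mk.get? t = (pre ++ ks).find? (fun k => (d.getD k []).contains t)) →
    (∀ p ∈ fd.items, p.1 ∈ pre) →
    (∀ s : String, (∃ p ∈ fd.items, s ∈ p.2) ↔ ∃ k' ∈ pre, s ∈ d.getD k' []) →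
    (ks.foldl (aStep d) fd).items = fd.items ++ ks.filterMap (gB d mk)
  | [], fd, pre, _, _, _, _ => by simp
  | k :: ks, fd, pre, hpw, hmk, hkeys, hblk => by
    have hsplit := List.pairwise_append.mp hpw
    have hprelt : ∀ a ∈ pre, a < k :=
      fun a ha => hsplit.2.2 a ha k List.mem_cons_self
    -- every kept item has a key < k, so A's `lower_key < key` filter keeps everything
    have hfilt : fd.items.filter (fun p => decide (p.1 < k)) = fd.items :=
      List.filter_eq_self.mpr (fun p hp => by simp [hprelt _ (hkeys p hp)])
    -- A's all-condition says: not blocked by any earlier key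
    have hallblk : ∀ s : String,
        (fd.items.all (fun p => !(p.2.contains s)) = true) ↔ ¬ ∃ k' ∈ pre, s ∈ d.getD k' [] := by
      intro s
      rw [← hblk s]
      simp [List.all_eq_true]
    -- B's condition says the same, for strings of the current list
    have hB : ∀ s ∈ d.getD k [], ((mk.getD s 0 == k) = true ↔ ¬ ∃ k' ∈ pre, s ∈ d.getD k' []) := by
      intro s hs
      have hfind := hmk s
      rw [List.find?_append] at hfind
      have hself : (d.getD k []).contains s = true := List.contains_iff_mem.mpr hs
      rcases hpre : pre.find? (fun k0 => (d.getD k0 []).contains s) with _ | k''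
      · have hnone := List.find?_eq_none.mp hpre
        have hgd : mk.getD s 0 = k := by
          rw [PySem.Dict.getD_eq_get?_getD, hfind, hpre, Option.none_or,
            show List.find? (fun k0 => (d.getD k0 []).contains s) (k :: ks) = some k
              from List.find?_cons_of_pos hself]
          rfl
        simp only [hgd, beq_self_eq_true, true_iff]
        rintro ⟨k', hk', hsk'⟩
        exact absurd (List.contains_iff_mem.mpr hsk') (by simpa using hnone k' hk')
      · have hk''pre : k'' ∈ pre := List.mem_of_find?_eq_some hpre
        have hk''s : s ∈ d.getD k'' [] := by
          have hp := List.find?_some hpre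
          simp only [] at hp
          exact List.contains_iff_mem.mp hp
        have hgd : mk.getD s 0 = k'' := by
          rw [PySem.Dict.getD_eq_get?_getD, hfind, hpre]; rfl
        have hne : (k'' == k) = false := beq_eq_false_iff_ne.mpr (ne_of_lt (hprelt _ hk''pre))
        simp only [hgd, hne, Bool.false_eq_true, false_iff, not_not]
        exact ⟨k'', hk''pre, hk''s⟩
    -- hence A's and B's filters of the current list coincide
    have hpoint : ∀ s ∈ d.getD k [],
        ((fd.items.filter (fun p => decide (p.1 < k))).all (fun p => !(p.2.contains s)))
          = (mk.getD s 0 == k) := by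
      intro s hs
      rw [hfilt, Bool.eq_iff_iff]
      exact (hallblk s).trans (hB s hs).symm
    have hfv : (d.getD k []).filter
        (fun s => ((fd.items.filter (fun p => decide (p.1 < k))).all (fun p => !(p.2.contains s))))
        = (d.getD k []).filter (fun s => mk.getD s 0 == k) :=
      List.filter_congr hpoint
    have hpw' : ((pre ++ [k]) ++ ks).Pairwise (· < ·) := by
      rw [List.append_assoc, List.singleton_append]; exact hpw
    have hmk' : ∀ t, mk.get? t = ((pre ++ [k]) ++ ks).find? (fun k0 => (d.getD k0 []).contains t) := by
      intro t; rw [List.append_assoc, List.singleton_append]; exact hmk t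
    rw [List.foldl_cons, List.filterMap_cons]
    show (ks.foldl (aStep d) (aStep d fd k)).items = _
    rw [aStep, hfv]
    by_cases he : ((d.getD k []).filter (fun s => mk.getD s 0 == k)).isEmpty = true
    · rw [if_pos he]
      have hgB : gB d mk k = none := by rw [gB]; exact if_pos he
      -- every string of the current list is blocked, so the blocked set does not grow
      have hblk' : ∀ s : String, (∃ p ∈ fd.items, s ∈ p.2) ↔ ∃ k' ∈ pre ++ [k], s ∈ d.getD k' [] := by
        intro s
        rw [hblk s]
        constructor
        · rintro ⟨k', hk', hs⟩; exact ⟨k', List.mem_append_left _ hk', hs⟩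
        · rintro ⟨k', hk', hs⟩
          rcases List.mem_append.mp hk' with h | h
          · exact ⟨k', h, hs⟩
          · rw [List.mem_singleton] at h
            rw [h] at hs
            have hemp := List.isEmpty_iff.mp he
            have := List.filter_eq_nil_iff.mp hemp s hs
            by_contra hno
            exact this ((hB s hs).mpr hno)
      rw [hgB, a_items d mk ks fd (pre ++ [k]) hpw' hmk'
        (fun p hp => List.mem_append_left _ (hkeys p hp)) hblk']
    · rw [if_neg he]
      have hgB : gB d mk k = some (k, (d.getD k []).filter (fun s => mk.getD s 0 == k)) := by
        rw [gB]; exact if_neg he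
      have hknotpre : k ∉ pre := fun h => lt_irrefl k (hprelt k h)
      have hfr : fd.contains k = false := by
        rw [PySem.Dict.contains_eq_decide_mem_keys]
        refine decide_eq_false fun hk => ?_
        rcases List.mem_map.mp hk with ⟨p, hp, hpk⟩
        exact hknotpre (hpk ▸ hkeys p hp)
      have hins := PySem.Dict.items_insert_of_not_contains fd
        ((d.getD k []).filter (fun s => mk.getD s 0 == k)) hfr
      have hkeys' : ∀ p ∈ (fd.insert k ((d.getD k []).filter (fun s => mk.getD s 0 == k))).items,
          p.1 ∈ pre ++ [k] := by
        intro p hp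
        rw [hins, List.mem_append] at hp
        rcases hp with h | h
        · exact List.mem_append_left _ (hkeys p h)
        · rw [List.mem_singleton] at h; subst h; simp
      have hblk' : ∀ s : String,
          (∃ p ∈ (fd.insert k ((d.getD k []).filter (fun s => mk.getD s 0 == k))).items, s ∈ p.2)
            ↔ ∃ k' ∈ pre ++ [k], s ∈ d.getD k' [] := by
        intro s
        constructor
        · rintro ⟨p, hp, hs⟩
          rw [hins, List.mem_append] at hp
          rcases hp with h | h
          · rcases (hblk s).mp ⟨p, h, hs⟩ with ⟨k', hk', hs'⟩
            exact ⟨k', List.mem_append_left _ hk', hs'⟩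
          · rw [List.mem_singleton] at h
            subst h
            exact ⟨k, List.mem_append_right _ (List.mem_singleton.mpr rfl),
              (List.mem_filter.mp hs).1⟩
        · rintro ⟨k', hk', hs'⟩
          rcases List.mem_append.mp hk' with h | h
          · rcases (hblk s).mpr ⟨k', h, hs'⟩ with ⟨p, hp, hs⟩
            exact ⟨p, by rw [hins]; exact List.mem_append_left _ hp, hs⟩
          · rw [List.mem_singleton] at h
            rw [h] at hs'
            by_cases hp : ∃ k0 ∈ pre, s ∈ d.getD k0 []
            · rcases (hblk s).mpr hp with ⟨p, hpm, hs⟩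
              exact ⟨p, by rw [hins]; exact List.mem_append_left _ hpm, hs⟩
            · refine ⟨(k, (d.getD k []).filter (fun s => mk.getD s 0 == k)),
                by rw [hins]; exact List.mem_append_right _ (List.mem_singleton.mpr rfl), ?_⟩
              exact List.mem_filter.mpr ⟨hs', (hB s hs').mpr hp⟩
      rw [a_items d mk ks _ (pre ++ [k]) hpw' hmk' hkeys' hblk', hins, hgB,
        List.append_assoc, List.singleton_append]

-- ===== VERDICT (by name: the statement is the Claim_ definition above) =====
theorem filter_strings_spec : Claim_equal_filter_strings := by
  intro dictionary _
  show filter_strings dictionary = filter_strings_alt dictionary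
  rw [filter_strings, filter_strings_alt]
  set d := PySem.Dict.ofList dictionary with hd
  set ks := PySem.List.sorted d.keys (fun k => k) false with hks
  set mk := ks.foldl (minKeyStep d) PySem.Dict.empty with hmkdef
  have hnd : ks.Nodup := (PySem.List.sorted_perm d.keys (fun k => k) false).nodup_iff.mpr
    (PySem.Dict.nodup_keys_ofList dictionary)
  have hle : ks.Pairwise (fun a b => a ≤ b) := PySem.List.sorted_pairwise d.keys (fun k => k)
  have hlt : ks.Pairwise (· < ·) := (hle.and hnd).imp (fun h => lt_of_le_of_ne h.1 h.2)
  have hmk : ∀ t, mk.get? t = ([] ++ ks).find? (fun k => (d.getD k []).contains t) := by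
    intro t
    rw [List.nil_append, hmkdef, mk_get? d t ks PySem.Dict.empty, PySem.Dict.get?_empty,
      Option.none_or]
  have hempty : (PySem.Dict.empty : PySem.Dict Int (List String)).items = [] := rfl
  have ha := a_items d mk ks PySem.Dict.empty [] (by simpa using hlt) hmk
    (by intro p hp; rw [hempty] at hp; simp at hp)
    (by
      intro s
      constructor
      · rintro ⟨p, hp, _⟩; rw [hempty] at hp; simp at hp
      · rintro ⟨k', hk', _⟩; simp at hk')
  have hb := b_items d mk ks PySem.Dict.empty hnd (by intro k _; rfl)
  rw [ha, hb]
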